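-- pv_equiv track=rewrite | github.com/jhadiksha65/Energeiaa | agents/orchestrator.py | calculate_wellness_score
-- ===== SOURCE A (Python) =====
-- def calculate_wellness_score(risk_indicators: list) -> int:
--     score = 100
--     for risk in risk_indicators:
--         level = risk.get("level", "Low")
--         if level == "High":
--             score -= 20
--         elif level == "Moderate":
--             score -= 10
--         elif level == "Low":
--             score -= 5
--     return max(0, min(100, score))
-- ===== SOURCE B (Python) =====
-- def calculate_wellness_score(risk_indicators: list) -> int:
--     # stage 1: materialise the level strings; stage 2: three count scans give the
--     # closed-form score; stage 3: clamp by taking the median of (0, score, 100).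
--     levels = [risk.get("level", "Low") for risk in risk_indicators]
--     score = 100 - 20 * levels.count("High") - 10 * levels.count("Moderate") - 5 * levels.count("Low")
--     return sorted((0, score, 100))[1]
-- ===== Notes on version B (the rewrite author's own statement) =====
-- stated objective: alternative
-- what changed: Replaces A's single accumulate-while-iterating pass with if/elif subtractions and a max/min clamp by staged passes: materialise the list of level strings, take three list.count scans to get a closed-form score, and clamp by taking the median of the triple (0, score, 100) via sorting.
import Mathlib
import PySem

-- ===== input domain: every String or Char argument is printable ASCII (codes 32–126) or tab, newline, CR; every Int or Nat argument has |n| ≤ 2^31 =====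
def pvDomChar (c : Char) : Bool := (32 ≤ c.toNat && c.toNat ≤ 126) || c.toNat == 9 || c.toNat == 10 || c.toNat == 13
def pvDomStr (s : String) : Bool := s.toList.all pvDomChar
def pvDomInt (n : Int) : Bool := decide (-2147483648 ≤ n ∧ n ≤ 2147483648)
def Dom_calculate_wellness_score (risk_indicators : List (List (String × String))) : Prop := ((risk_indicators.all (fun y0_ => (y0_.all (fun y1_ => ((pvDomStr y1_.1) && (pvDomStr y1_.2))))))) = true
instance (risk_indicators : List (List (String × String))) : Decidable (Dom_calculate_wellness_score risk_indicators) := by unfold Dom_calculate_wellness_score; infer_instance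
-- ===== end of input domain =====

-- B replaces A's accumulate-while-iterating subtraction by staged passes: materialise the
-- level strings, three count scans for a closed-form score, clamp via median of (0,score,100)
-- (alternative decomposition, same cost).


-- ===== PORT A =====
def calculate_wellness_score (risk_indicators : List (List (String × String))) : Int :=
  let score : Int :=
    risk_indicators.foldl (fun score risk =>
      let level := (PySem.Dict.mk risk).getD "level" "Low"
      if level == "High" then score - 20
      else if level == "Moderate" then score - 10
      else if level == "Low" then score - 5
      else score) 100
  max 0 (min 100 score)

-- ===== PORT B =====
def calculate_wellness_score_alt (risk_indicators : List (List (String × String))) : Int :=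
  let levels := risk_indicators.map (fun risk => (PySem.Dict.mk risk).getD "level" "Low")
  let score : Int :=
    100 - 20 * (PySem.List.count levels "High" : Int)
        - 10 * (PySem.List.count levels "Moderate" : Int)
        - 5 * (PySem.List.count levels "Low" : Int)
  -- sorted((0, score, 100))[1]; index 1 of a 3-element list is always in range, so getD's
  -- default is unreachable
  (PySem.List.pyGet? (PySem.List.sorted [0, score, 100] (fun x => x) false) 1).getD 0

-- ===== PRECONDITION & SPEC =====
def Spec_calculate_wellness_score (risk_indicators : List (List (String × String))) (out : Int) : Prop := out = calculate_wellness_score_alt risk_indicators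
instance (risk_indicators : List (List (String × String))) (out : Int) : Decidable (Spec_calculate_wellness_score risk_indicators out) := by unfold Spec_calculate_wellness_score; infer_instance

-- ===== CLAIM (what is proved, stated in full; the proofs are below) =====
def Claim_equal_calculate_wellness_score : Prop := ∀ (risk_indicators : List (List (String × String))), Dom_calculate_wellness_score risk_indicators → Spec_calculate_wellness_score risk_indicators (calculate_wellness_score risk_indicators)

-- ===== LEMMAS AND PROOFS =====

/-- the level string a row contributes -/
def pvLevel (risk : List (String × String)) : String := (PySem.Dict.mk risk).getD "level" "Low"

/-- A's loop, characterised by the level counts of the list. -/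
theorem pvFoldA (l : List (List (String × String))) (s : Int) :
    l.foldl (fun score risk =>
      if pvLevel risk == "High" then score - 20
      else if pvLevel risk == "Moderate" then score - 10
      else if pvLevel risk == "Low" then score - 5
      else score) s
    = s - 20 * ((l.map pvLevel).count "High")
        - 10 * ((l.map pvLevel).count "Moderate")
        - 5 * ((l.map pvLevel).count "Low") := by
  induction l generalizing s with
  | nil => simp
  | cons h t ih =>
    simp only [List.foldl_cons, List.map_cons, List.count_cons, ih]
    by_cases h1 : pvLevel h = "High" <;> by_cases h2 : pvLevel h = "Moderate" <;>
      by_cases h3 : pvLevel h = "Low" <;> simp_all <;> ring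

/-- B's clamp: the median of (0, s, 100) obtained by sorting is max 0 (min 100 s). -/
theorem pvMedianClamp (s : Int) :
    (PySem.List.pyGet? (PySem.List.sorted [0, s, 100] (fun x => x) false) 1).getD 0
      = max 0 (min 100 s) := by
  by_cases h1 : s < 0 <;> by_cases h2 : 100 < s <;>
    simp [PySem.List.sorted, PySem.List.insertBy, PySem.List.pyGet?, PySem.List.pyIdx?, h1, h2] <;>
    omega

-- ===== VERDICT (by name: the statement is the Claim_ definition above) =====
theorem calculate_wellness_score_spec : Claim_equal_calculate_wellness_score := by
  intro l _
  unfold Spec_calculate_wellness_score calculate_wellness_score calculate_wellness_score_alt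
  rw [show (fun (score : Int) (risk : List (String × String)) =>
      let level := (PySem.Dict.mk risk).getD "level" "Low"
      if level == "High" then score - 20
      else if level == "Moderate" then score - 10
      else if level == "Low" then score - 5
      else score)
    = (fun score risk =>
      if pvLevel risk == "High" then score - 20
      else if pvLevel risk == "Moderate" then score - 10
      else if pvLevel risk == "Low" then score - 5
      else score) from rfl]
  rw [show (fun (risk : List (String × String)) => (PySem.Dict.mk risk).getD "level" "Low")
    = pvLevel from rfl]
  simp only [pvFoldA, pvMedianClamp, PySem.List.count_eq]
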